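-- pv_equiv track=rewrite | github.com/isaacmartin1/neetcode-submissions-gwnu7hln | Data Structures & Algorithms/find-duplicate-integer/submission-0.py | check_limit
-- ===== SOURCE A (Python) =====
-- def check_limit(nums, index, increment):
--     limit = len(nums) - 1
--     while increment > 0:
--         increment -= 1
--         index += 1
--         if index > limit:
--             index = 0
--     return index
-- ===== SOURCE B (Python) =====
-- def check_limit(nums, index, increment):
--     if increment <= 0:
--         return index
--     n = len(nums)
--     t = max(0, n - 1 - index)  # non-wrapping steps before the first wrap to 0
--     if increment <= t:
--         return index + increment
--     if n == 0:
--         return 0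
--     return (increment - t - 1) % n
-- ===== Notes on version B (the rewrite author's own statement) =====
-- stated objective: faster
-- what changed: Replaces the step-by-step while loop (one iteration per increment unit) with an O(1) closed form: count the straight steps until the first wrap to 0, then reduce the remaining steps modulo len(nums).
import Mathlib
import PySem

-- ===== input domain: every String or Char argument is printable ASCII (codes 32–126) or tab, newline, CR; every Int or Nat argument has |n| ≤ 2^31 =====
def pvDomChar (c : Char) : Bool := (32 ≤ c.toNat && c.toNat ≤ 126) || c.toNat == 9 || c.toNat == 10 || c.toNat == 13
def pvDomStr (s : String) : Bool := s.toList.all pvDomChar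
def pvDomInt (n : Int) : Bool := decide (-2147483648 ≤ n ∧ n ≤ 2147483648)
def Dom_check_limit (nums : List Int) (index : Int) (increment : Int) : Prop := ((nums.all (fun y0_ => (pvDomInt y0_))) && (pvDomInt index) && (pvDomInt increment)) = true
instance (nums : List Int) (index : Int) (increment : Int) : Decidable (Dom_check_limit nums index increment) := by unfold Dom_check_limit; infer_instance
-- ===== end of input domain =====

-- ===== PORT A =====
-- B replaces A's step-by-step loop by an O(1) closed form (count straight steps before the
-- first wrap, then modular arithmetic); equivalence proved for all inputs.
def check_limit (nums : List Int) (index : Int) (increment : Int) : Int :=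
  if increment > 0 then
    check_limit nums
      (if index + 1 > (nums.length : Int) - 1 then 0 else index + 1)
      (increment - 1)
  else index
termination_by increment.toNat
decreasing_by omega

-- ===== PORT B =====
def check_limit_alt (nums : List Int) (index : Int) (increment : Int) : Int :=
  if increment ≤ 0 then index
  else
    let n : Int := nums.length
    let t : Int := max 0 (n - 1 - index)
    if increment ≤ t then index + increment
    else if n = 0 then 0
    else PySem.Int.mod (increment - t - 1) n

-- ===== PRECONDITION & SPEC =====
def Spec_check_limit (nums : List Int) (index : Int) (increment : Int) (out : Int) : Prop := out = check_limit_alt nums index increment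
instance (nums : List Int) (index : Int) (increment : Int) (out : Int) : Decidable (Spec_check_limit nums index increment out) := by unfold Spec_check_limit; infer_instance

-- ===== CLAIM (what is proved, stated in full; the proofs are below) =====
def Claim_equal_check_limit : Prop := ∀ (nums : List Int) (index : Int) (increment : Int), Dom_check_limit nums index increment → Spec_check_limit nums index increment (check_limit nums index increment)

-- ===== LEMMAS AND PROOFS =====

-- ===== VERDICT (by name: the statement is the Claim_ definition above) =====
-- B's closed form satisfies A's loop recurrence
theorem alt_step (nums : List Int) (index increment : Int) (h : increment > 0) :
    check_limit_alt nums index increment =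
      check_limit_alt nums
        (if index + 1 > (nums.length : Int) - 1 then 0 else index + 1)
        (increment - 1) := by
  simp only [check_limit_alt]
  set n : Int := (nums.length : Int) with hn
  have hn0 : 0 ≤ n := by simp [hn]
  by_cases hz : n = 0
  · simp only [hz]
    split_ifs <;> omega
  · have hpos : 0 < n := by omega
    simp only [PySem.Int.mod_eq_emod_of_pos hpos]
    split_ifs <;> try omega
    · rw [show increment - max 0 (n - 1 - index) - 1 = 0 from by omega, Int.zero_emod]
    · rw [show increment - max 0 (n - 1 - index) - 1 = increment - 1 from by omega,
          Int.emod_eq_of_lt (by omega) (by omega)]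
      omega
    · rw [show increment - 1 - max 0 (n - 1 - 0) - 1
            = (increment - max 0 (n - 1 - index) - 1) - n from by omega,
          Int.sub_emod_right]
    · rw [show increment - 1 - max 0 (n - 1 - (index + 1)) - 1
            = increment - max 0 (n - 1 - index) - 1 from by omega]


theorem check_limit_spec : Claim_equal_check_limit := by
  intro nums index increment _
  unfold Spec_check_limit
  suffices H : ∀ (k : Nat) (index increment : Int), increment.toNat = k →
      check_limit nums index increment = check_limit_alt nums index increment from
    H increment.toNat index increment rfl
  intro k
  induction k with
  | zero =>
    intro index increment hk
    rw [check_limit, if_neg (by omega : ¬ increment > 0),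
        check_limit_alt, if_pos (by omega : increment ≤ 0)]
  | succ k ih =>
    intro index increment hk
    have h : increment > 0 := by omega
    rw [check_limit, if_pos h, alt_step nums index increment h]
    exact ih _ _ (by omega)
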